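-- pv_equiv track=rewrite | github.com/nicolascarratala/version-2019 | 57008 - Rodrigo Alvarez/clase_02/pipe_fixer.py | pipe_fix
-- ===== SOURCE A (Python) =====
-- def pipe_fix(lista):
--     primero = lista[0]
--     new_value = []
--     new_value.append(primero)
--     for value in range (lista[0], lista[-1]):
--         primero += 1
--         new_value.append(primero)
--     return new_value
-- ===== SOURCE B (Python) =====
-- def pipe_fix(lista):
--     # build the list BACK-TO-FRONT: walk down from the top endpoint to the
--     # first element, appending, then reverse once at the end
--     lo = lista[0]
--     cur = max(lo, lista[-1])
--     out = []
--     while cur > lo: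
--         out.append(cur)
--         cur -= 1
--     out.append(lo)
--     out.reverse()
--     return out
-- ===== Notes on version B (the rewrite author's own statement) =====
-- stated objective: alternative
-- what changed: Instead of A's count-up counter appending into an accumulator alongside a range iteration, B constructs the list back-to-front: it walks DOWN from the top endpoint to the first element appending each value, then reverses once (max handles descending lists, where A's loop runs zero times).
import Mathlib
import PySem

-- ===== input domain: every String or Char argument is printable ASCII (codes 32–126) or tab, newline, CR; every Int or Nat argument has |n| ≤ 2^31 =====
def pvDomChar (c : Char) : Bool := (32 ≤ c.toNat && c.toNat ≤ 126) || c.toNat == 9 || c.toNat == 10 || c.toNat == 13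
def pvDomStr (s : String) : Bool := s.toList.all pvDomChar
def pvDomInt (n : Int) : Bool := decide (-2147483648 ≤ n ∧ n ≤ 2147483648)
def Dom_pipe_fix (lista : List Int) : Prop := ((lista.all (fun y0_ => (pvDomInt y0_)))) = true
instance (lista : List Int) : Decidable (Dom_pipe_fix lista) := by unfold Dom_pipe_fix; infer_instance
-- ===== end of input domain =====

-- B builds the inclusive range BACK-TO-FRONT (walk down from the top endpoint, then reverse)
-- instead of A's count-up counter-and-append loop; objective: alternative (same cost).

-- ===== PORT A =====
def pipe_fix (lista : List Int) : List Int :=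
  match PySem.List.pyGet? lista 0, PySem.List.pyGet? lista (-1) with
  | some primero, some ultimo =>
      -- new_value = [primero]; for value in range(lista[0], lista[-1]): primero += 1; append
      (((PySem.List.pyRange primero ultimo 1).foldl
          (fun (st : Int × List Int) _ => (st.1 + 1, st.2 ++ [st.1 + 1]))
          (primero, [primero]))).2
  | _, _ => []  -- unreachable under Pre_ (IndexError on empty list)

-- ===== PORT B =====
-- the while loop of Source B: append cur, cur-1, … while cur > lo, then append lo and reverse
def pipeFixDown (lo cur : Int) (out : List Int) : List Int :=
  if lo < cur then pipeFixDown lo (cur - 1) (out ++ [cur]) else (out ++ [lo]).reverse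
  termination_by (cur - lo).toNat
  decreasing_by omega

def pipe_fix_alt (lista : List Int) : List Int :=
  (((PySem.List.pyGet? lista 0).bind (fun lo =>
      (PySem.List.pyGet? lista (-1)).map (fun b =>
        pipeFixDown lo (max lo b) [])))).getD []  -- none only outside Pre_

-- ===== PRECONDITION & SPEC =====
-- A raises IndexError on the empty list (lista[0]); that is the only excluded input.
def Pre_pipe_fix (lista : List Int) : Prop := lista ≠ []
instance (lista : List Int) : Decidable (Pre_pipe_fix lista) := by unfold Pre_pipe_fix; infer_instance
def pvWitness_pipe_fix : List Int := [3, 7]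

def Spec_pipe_fix (lista : List Int) (out : List Int) : Prop := out = pipe_fix_alt lista
instance (lista : List Int) (out : List Int) : Decidable (Spec_pipe_fix lista out) := by unfold Spec_pipe_fix; infer_instance

-- ===== CLAIM (what is proved, stated in full; the proofs are below) =====
def Claim_equal_pipe_fix : Prop := ∀ (lista : List Int), Dom_pipe_fix lista → Pre_pipe_fix lista → Spec_pipe_fix lista (pipe_fix lista)

-- ===== LEMMAS AND PROOFS =====

-- A's loop body only uses the range's length: it appends p+1, …, p+l.length.
lemma pipe_fix_loop (l : List Int) (p : Int) (acc : List Int) :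
    l.foldl (fun (st : Int × List Int) _ => (st.1 + 1, st.2 ++ [st.1 + 1])) (p, acc)
      = (p + l.length, acc ++ PySem.List.pyRange (p + 1) (p + l.length + 1) 1) := by
  induction l generalizing p acc with
  | nil => simp [PySem.List.pyRange_one_eq_nil (le_refl (p + 1))]
  | cons x t ih =>
      simp only [List.foldl_cons, ih (p + 1) (acc ++ [p + 1]), List.length_cons]
      push_cast
      have h2 : PySem.List.pyRange (p + 1) (p + 1 + ↑t.length + 1) 1
          = (p + 1) :: PySem.List.pyRange (p + 1 + 1) (p + 1 + ↑t.length + 1) 1 :=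
        PySem.List.pyRange_one_cons (by omega)
      rw [show p + ((t.length : Int) + 1) + 1 = p + 1 + ↑t.length + 1 from by ring,
          show p + ((t.length : Int) + 1) = p + 1 + ↑t.length from by ring, h2]
      simp

-- A's whole computation is the ascending inclusive range lo..max lo b.
lemma pipe_fix_core (a b : Int) :
    (((PySem.List.pyRange a b 1).foldl
        (fun (st : Int × List Int) _ => (st.1 + 1, st.2 ++ [st.1 + 1]))
        (a, [a]))).2 = PySem.List.pyRange a (max a b + 1) 1 := by
  rw [pipe_fix_loop]
  simp only [PySem.List.length_pyRange_one]
  have hlt : a < max a b + 1 := by omega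
  rw [show a + ((b - a).toNat : Int) + 1 = max a b + 1 from by omega,
      PySem.List.pyRange_one_cons hlt]
  simp

-- B's countdown loop appends the descending range cur..lo, then reverses.
lemma pipeFixDown_eq (lo cur : Int) (out : List Int) (h : lo ≤ cur) :
    pipeFixDown lo cur out = (out ++ PySem.List.pyRange cur (lo - 1) (-1)).reverse := by
  induction hn : (cur - lo).toNat generalizing cur out with
  | zero =>
      have hcl : cur = lo := by omega
      rw [pipeFixDown, if_neg (by omega), hcl,
          PySem.List.pyRange_neg_one_cons (by omega : lo - 1 < lo),
          PySem.List.pyRange_neg_one_eq_nil (le_refl (lo - 1))]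
  | succ n ih =>
      rw [pipeFixDown, if_pos (by omega), ih (cur - 1) _ (by omega) (by omega),
          PySem.List.pyRange_neg_one_cons (by omega : lo - 1 < cur)]
      simp

-- B's whole computation is the same ascending inclusive range.
lemma pipe_fix_alt_core (a b : Int) :
    pipeFixDown a (max a b) [] = PySem.List.pyRange a (max a b + 1) 1 := by
  rw [pipeFixDown_eq a (max a b) [] (le_max_left a b),
      PySem.List.pyRange_neg_one_eq_reverse]
  simp [show a - 1 + 1 = a from by ring]

-- ===== VERDICT (by name: the statement is the Claim_ definition above) =====
theorem pipe_fix_spec : Claim_equal_pipe_fix := by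
  intro lista _ _
  unfold Spec_pipe_fix pipe_fix pipe_fix_alt
  rcases _h0 : PySem.List.pyGet? lista 0 with _ | a <;>
    rcases _h1 : PySem.List.pyGet? lista (-1) with _ | b <;>
      simp [pipe_fix_core, pipe_fix_alt_core]
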